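-- pv_equiv track=rewrite | github.com/adam-berlak/REL-Studios-Music-Robot | RELMusicTheory/Scale.py | binaryToScaleSteps
-- ===== SOURCE A (Python) =====
-- def binaryToScaleSteps(p_binary):
--
-- 	binary = p_binary[len(p_binary)::-1]
-- 	binary = (binary + binary[0])[1:]
-- 	scale_steps = []
-- 	semitones = 0
--
-- 	for i in range(len(binary)):
-- 		if (binary[i] == '0'): semitones = semitones + 1
-- 		else:
-- 			semitones = semitones + 1
-- 			scale_steps.append(semitones)
-- 			semitones = 0
--
-- 	return scale_steps
-- ===== SOURCE B (Python) =====
-- def binaryToScaleSteps(p_binary):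
-- 	# same preprocessing as the original (reverse, then rotate left by one)
-- 	binary = p_binary[len(p_binary)::-1]
-- 	binary = (binary + binary[0])[1:]
-- 	# indices of the set bits; steps are first index + 1 followed by consecutive gaps
-- 	ones = [i for i, c in enumerate(binary) if c != '0']
-- 	if not ones:
-- 		return []
-- 	return [ones[0] + 1] + [b - a for a, b in zip(ones, ones[1:])]
-- ===== Notes on version B (the rewrite author's own statement) =====
-- stated objective: alternative
-- what changed: Replaces A's running semitone accumulator scan with computing the list of set-bit indices via enumerate and returning first index + 1 followed by consecutive index differences.
import Mathlib
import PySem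

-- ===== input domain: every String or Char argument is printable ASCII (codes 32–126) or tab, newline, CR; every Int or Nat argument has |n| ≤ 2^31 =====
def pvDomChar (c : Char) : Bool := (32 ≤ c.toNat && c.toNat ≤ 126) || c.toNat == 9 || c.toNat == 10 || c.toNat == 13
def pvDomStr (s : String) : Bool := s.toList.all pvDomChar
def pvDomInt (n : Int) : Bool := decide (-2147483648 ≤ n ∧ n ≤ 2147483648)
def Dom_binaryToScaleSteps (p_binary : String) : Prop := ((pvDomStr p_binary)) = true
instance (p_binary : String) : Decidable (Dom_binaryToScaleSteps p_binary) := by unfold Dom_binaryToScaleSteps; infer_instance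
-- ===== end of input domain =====

-- B replaces A's accumulator scan by the index list of set bits and its consecutive differences (different decomposition, same cost).

-- ===== PORT A =====
def binaryToScaleSteps (p_binary : String) : List Int :=
  -- binary = p_binary[len(p_binary)::-1]
  let binary0 := (PySem.List.slice? p_binary.toList (some (p_binary.toList.length : Int)) none (-1)).getD []
  -- binary[0] raises IndexError on the empty string (excluded by Pre_)
  match PySem.List.pyGet? binary0 0 with
  | none => []
  | some c =>
    -- binary = (binary + binary[0])[1:]
    let binary := PySem.List.slice (binary0 ++ [c]) (some 1) none
    ((PySem.List.pyRange 0 (binary.length : Int) 1).foldl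
      (fun (st : List Int × Int) i =>
        if PySem.List.pyGetD binary i ' ' = '0' then (st.1, st.2 + 1)
        else (st.1 ++ [st.2 + 1], 0)) ([], 0)).1

-- ===== PORT B =====
def binaryToScaleSteps_alt (p_binary : String) : List Int :=
  -- same preprocessing as A (reverse, rotate left by one); binary[0] raises on ""
  let binary0 := (PySem.List.slice? p_binary.toList (some (p_binary.toList.length : Int)) none (-1)).getD []
  match PySem.List.pyGet? binary0 0 with
  | none => []
  | some c =>
    let binary := PySem.List.slice (binary0 ++ [c]) (some 1) none
    -- ones = [i for i, c in enumerate(binary) if c != '0']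
    let ones := ((PySem.List.enumerate binary 0).filter (fun p => p.2 != '0')).map (·.1)
    match ones with
    | [] => []
    | i0 :: rest => (i0 + 1) :: ((i0 :: rest).zip rest).map (fun p => p.2 - p.1)

-- ===== PRECONDITION & SPEC =====
-- Pre_ excludes only the empty string, where both Pythons raise IndexError on binary[0].
def Pre_binaryToScaleSteps (p_binary : String) : Prop := p_binary ≠ ""
instance (p_binary : String) : Decidable (Pre_binaryToScaleSteps p_binary) := by unfold Pre_binaryToScaleSteps; infer_instance
def pvWitness_binaryToScaleSteps : String := "1011"

def Spec_binaryToScaleSteps (p_binary : String) (out : List Int) : Prop := out = binaryToScaleSteps_alt p_binary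
instance (p_binary : String) (out : List Int) : Decidable (Spec_binaryToScaleSteps p_binary out) := by unfold Spec_binaryToScaleSteps; infer_instance

-- ===== CLAIM (what is proved, stated in full; the proofs are below) =====
def Claim_equal_binaryToScaleSteps : Prop := ∀ (p_binary : String), Dom_binaryToScaleSteps p_binary → Pre_binaryToScaleSteps p_binary → Spec_binaryToScaleSteps p_binary (binaryToScaleSteps p_binary)

-- ===== LEMMAS AND PROOFS =====

-- A's loop as a structural recursion: pending semitone count s, emit s+1 at each set bit.
def pvF (s : Int) : List Char → List Int
  | [] => []
  | c :: bs => if c = '0' then pvF (s + 1) bs else (s + 1) :: pvF 0 bs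

-- B's index list as a structural recursion with running index s.
def pvIdxF (s : Int) : List Char → List Int
  | [] => []
  | c :: bs => if c = '0' then pvIdxF (s + 1) bs else s :: pvIdxF (s + 1) bs

def pvGaps (l : List Int) : List Int := (l.zip l.tail).map (fun p => p.2 - p.1)

def pvB (s : Int) (l : List Int) : List Int :=
  match l with
  | [] => []
  | i0 :: _ => (s + i0 + 1) :: pvGaps l

lemma pvFoldA (bs : List Char) : ∀ (acc : List Int) (s : Int),
    (bs.foldl (fun (st : List Int × Int) c =>
      if c = '0' then (st.1, st.2 + 1) else (st.1 ++ [st.2 + 1], 0)) (acc, s)).1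
      = acc ++ pvF s bs := by
  induction bs with
  | nil => intro acc s; simp [pvF]
  | cons c bs ih =>
    intro acc s
    by_cases h : c = '0' <;> simp [pvF, h, ih]

lemma pvEnumIdx (bs : List Char) : ∀ s : Int,
    ((PySem.List.enumerate bs s).filter (fun p => p.2 != '0')).map (·.1) = pvIdxF s bs := by
  induction bs with
  | nil => intro s; simp [PySem.List.enumerate_nil, pvIdxF]
  | cons c bs ih =>
    intro s
    by_cases h : c = '0' <;>
      simp [PySem.List.enumerate_cons, pvIdxF, h, ih]

lemma pvIdxF_shift (bs : List Char) : ∀ (s t : Int),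
    pvIdxF (s + t) bs = (pvIdxF s bs).map (· + t) := by
  induction bs with
  | nil => intro s t; simp [pvIdxF]
  | cons c bs ih =>
    intro s t
    by_cases h : c = '0' <;>
      simp [pvIdxF, h, show s + t + 1 = (s + 1) + t by ring, ih]

lemma pvGaps_cons₂ (a b : Int) (r : List Int) :
    pvGaps (a :: b :: r) = (b - a) :: pvGaps (b :: r) := by
  simp [pvGaps]

lemma pvGaps_shift (l : List Int) (t : Int) : pvGaps (l.map (· + t)) = pvGaps l := by
  induction l with
  | nil => simp [pvGaps]
  | cons a l ih =>
    cases l with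
    | nil => simp [pvGaps]
    | cons b r =>
      simp only [List.map_cons] at ih ⊢
      rw [pvGaps_cons₂, pvGaps_cons₂, ih]
      congr 1
      ring

lemma pvF_eq_pvB (bs : List Char) : ∀ s : Int, pvF s bs = pvB s (pvIdxF 0 bs) := by
  induction bs with
  | nil => intro s; simp [pvF, pvIdxF, pvB]
  | cons c bs ih =>
    intro s
    have hsh : pvIdxF (1 : Int) bs = (pvIdxF 0 bs).map (· + 1) := by
      have := pvIdxF_shift bs 0 1; simpa using this
    by_cases h : c = '0'
    · simp only [pvF, pvIdxF, if_pos h, ih (s + 1)]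
      rw [show (0 : Int) + 1 = 1 by ring, hsh]
      cases hl : pvIdxF 0 bs with
      | nil => simp [pvB]
      | cons i0 r =>
        simp only [pvB, List.map_cons]
        rw [show ((i0 + 1) :: List.map (fun x => x + 1) r) =
              ((i0 :: r).map (· + 1)) by simp, pvGaps_shift]
        congr 1
        ring
    · simp only [pvF, pvIdxF, if_neg h, ih 0]
      rw [show (0 : Int) + 1 = 1 by ring, hsh]
      cases hl : pvIdxF 0 bs with
      | nil => simp [pvB, pvGaps]
      | cons i0 r =>
        simp only [pvB, List.map_cons]
        rw [pvGaps_cons₂, show ((i0 + 1) :: List.map (fun x => x + 1) r) =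
              ((i0 :: r).map (· + 1)) by simp, pvGaps_shift]
        simp only [sub_zero, zero_add, add_zero]

-- ===== VERDICT (by name: the statement is the Claim_ definition above) =====
theorem binaryToScaleSteps_spec : Claim_equal_binaryToScaleSteps := by
  intro p hdom hpre
  unfold Spec_binaryToScaleSteps binaryToScaleSteps binaryToScaleSteps_alt
  simp only []
  split
  · rfl
  · rename_i c hget
    generalize PySem.List.slice
      (((PySem.List.slice? p.toList (some (p.toList.length : Int)) none (-1)).getD []) ++ [c])
      (some 1) none = bs
    rw [PySem.List.foldl_pyRange_zero_pyGetD' bs ' '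
      (fun (st : List Int × Int) c =>
        if c = '0' then (st.1, st.2 + 1) else (st.1 ++ [st.2 + 1], 0)) ([], 0)]
    rw [pvFoldA bs [] 0, List.nil_append, pvF_eq_pvB, pvEnumIdx bs 0]
    cases hl : pvIdxF 0 bs with
    | nil => simp [pvB]
    | cons i0 r => simp [pvB, pvGaps]
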